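-- pv_equiv track=rewrite | github.com/xenokhrist/supersector | app.py | search_tags
-- ===== SOURCE A (Python) =====
-- from typing import List, Set, Optional, Tuple, Dict, Any
-- from typing import List, Set, Optional, Tuple, Dict, Any
-- from typing import List, Set, Tuple, Dict
-- from typing import Dict, List, Tuple, Optional
-- from typing import Dict, List, Tuple, Optional
--
-- def search_tags(
--     all_tags: Set[str],
--     search_term: str,
--     max_results: int = 100
-- ) -> List[str]:
--     """
--     Fast tag search with fuzzy matching
--
--     Returns top matching tags sorted by relevance
--     """
--
--     if not search_term:
--         return sorted(list(all_tags))[:max_results]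
--
--     search_lower = search_term.lower()
--
--     # Score each tag
--     scored_tags = []
--
--     for tag in all_tags:
--         tag_lower = tag.lower()
--
--         # Exact match
--         if tag_lower == search_lower:
--             scored_tags.append((tag, 100))
--         # Starts with search term
--         elif tag_lower.startswith(search_lower):
--             scored_tags.append((tag, 90))
--         # Contains search term
--         elif search_lower in tag_lower:
--             scored_tags.append((tag, 70))
--         # Words start with search term
--         elif any(word.startswith(search_lower) for word in tag_lower.split()):
--             scored_tags.append((tag, 50))
--
--     # Sort by score (descending) then alphabetically
--     scored_tags.sort(key=lambda x: (-x[1], x[0]))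
--
--     return [tag for tag, _ in scored_tags[:max_results]]
-- ===== SOURCE B (Python) =====
-- def search_tags(all_tags, search_term, max_results=100):
--     # Sort the whole tag set alphabetically once, then make four staged passes
--     # over the sorted list -- one per relevance tier -- emitting unseen matches.
--     ordered = sorted(all_tags)
--     if not search_term:
--         return ordered[:max_results]
--
--     s = search_term.lower()
--     tests = [
--         lambda t: t == s,
--         lambda t: t.startswith(s),
--         lambda t: s in t,
--         lambda t: any(w.startswith(s) for w in t.split()),
--     ]
--     result, seen = [], set()
--     for test in tests:
--         for tag in ordered:
--             if tag not in seen and test(tag.lower()):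
--                 seen.add(tag)
--                 result.append(tag)
--     return result[:max_results]
-- ===== Notes on version B (the rewrite author's own statement) =====
-- stated objective: alternative
-- what changed: B never builds or sorts (tag, score) pairs: it sorts the tag set alphabetically once up front, then makes four staged passes (one per relevance test) over that sorted list, emitting each not-yet-seen matching tag in order and truncating at the end, so scores and the composite (-score, tag) sort key disappear entirely.
import Mathlib
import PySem

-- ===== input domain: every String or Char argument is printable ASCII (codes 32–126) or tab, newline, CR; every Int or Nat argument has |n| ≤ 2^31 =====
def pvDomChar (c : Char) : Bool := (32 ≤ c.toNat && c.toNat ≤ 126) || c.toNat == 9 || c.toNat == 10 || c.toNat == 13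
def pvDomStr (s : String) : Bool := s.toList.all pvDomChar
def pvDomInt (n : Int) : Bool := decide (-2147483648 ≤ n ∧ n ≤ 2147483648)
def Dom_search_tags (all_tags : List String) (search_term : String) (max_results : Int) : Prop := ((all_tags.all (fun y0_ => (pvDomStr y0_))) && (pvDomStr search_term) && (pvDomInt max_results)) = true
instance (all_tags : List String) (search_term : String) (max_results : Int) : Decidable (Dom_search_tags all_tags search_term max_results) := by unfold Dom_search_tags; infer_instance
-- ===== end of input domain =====

-- B drops the (tag, score) pairs and the composite (-score, tag) sort entirely: it sorts the
-- tag set alphabetically once, then makes four staged passes (one per relevance test) over the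
-- sorted list, emitting each not-yet-seen matching tag (objective: alternative decomposition).

-- ===== PORT A =====
def search_tags (all_tags : List String) (search_term : String) (max_results : Int) : List String :=
  if search_term == "" then
    PySem.List.slice (PySem.List.sorted all_tags (fun t => t)) none (some max_results)
  else
    let search_lower := PySem.Str.lower search_term
    let scored_tags : List (String × Int) := all_tags.foldl (fun acc tag =>
      let tag_lower := PySem.Str.lower tag
      if tag_lower == search_lower then acc ++ [(tag, 100)]
      else if PySem.Str.startswith tag_lower search_lower then acc ++ [(tag, 90)]
      else if PySem.Str.isIn search_lower tag_lower then acc ++ [(tag, 70)]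
      else if (PySem.Str.split₀ tag_lower).any (fun word => PySem.Str.startswith word search_lower) then acc ++ [(tag, 50)]
      else acc) []
    let sorted_tags := PySem.List.sorted2 scored_tags (fun x => -x.2) (fun x => x.1)
    (PySem.List.slice sorted_tags none (some max_results)).map (fun x => x.1)

-- ===== PORT B =====
def search_tags_alt (all_tags : List String) (search_term : String) (max_results : Int) : List String :=
  let ordered := PySem.List.sorted all_tags (fun t => t)
  if search_term == "" then
    PySem.List.slice ordered none (some max_results)
  else
    let s := PySem.Str.lower search_term
    let tests : List (String → Bool) :=
      [fun t => t == s,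
       fun t => PySem.Str.startswith t s,
       fun t => PySem.Str.isIn s t,
       fun t => (PySem.Str.split₀ t).any (fun w => PySem.Str.startswith w s)]
    let fin := tests.foldl (fun acc test =>
      ordered.foldl (fun acc tag =>
        if !(PySem.Set.contains acc.2 tag) && test (PySem.Str.lower tag) then
          (acc.1 ++ [tag], PySem.Set.add acc.2 tag)
        else acc) acc) (([] : List String), (PySem.Set.empty : PySem.Set String))
    PySem.List.slice fin.1 none (some max_results)

-- ===== PRECONDITION & SPEC =====
-- all_tags is a Python set, so by the type convention the List String argument holds its
-- DISTINCT elements; Pre_ records exactly that duplicate-freeness and excludes nothing else.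
def Pre_search_tags (all_tags : List String) (search_term : String) (max_results : Int) : Prop := all_tags.Nodup
instance (all_tags : List String) (search_term : String) (max_results : Int) : Decidable (Pre_search_tags all_tags search_term max_results) := by unfold Pre_search_tags; infer_instance
def pvWitness_search_tags : List String × String × Int := (["python", "python3", "micropython", "java", "py tools"], "python", 3)

def Spec_search_tags (all_tags : List String) (search_term : String) (max_results : Int) (out : List String) : Prop := out = search_tags_alt all_tags search_term max_results
instance (all_tags : List String) (search_term : String) (max_results : Int) (out : List String) : Decidable (Spec_search_tags all_tags search_term max_results out) := by unfold Spec_search_tags; infer_instance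

-- ===== CLAIM (what is proved, stated in full; the proofs are below) =====
def Claim_equal_search_tags : Prop := ∀ (all_tags : List String) (search_term : String) (max_results : Int), Dom_search_tags all_tags search_term max_results → Pre_search_tags all_tags search_term max_results → Spec_search_tags all_tags search_term max_results (search_tags all_tags search_term max_results)

-- ===== LEMMAS AND PROOFS =====

-- the four cascade conditions of A's loop (s = lowercased search term, t = the tag)
def pvC1 (s t : String) : Bool := PySem.Str.lower t == s
def pvC2 (s t : String) : Bool := PySem.Str.startswith (PySem.Str.lower t) s
def pvC3 (s t : String) : Bool := PySem.Str.isIn s (PySem.Str.lower t)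
def pvC4 (s t : String) : Bool := (PySem.Str.split₀ (PySem.Str.lower t)).any (fun word => PySem.Str.startswith word s)
-- tier membership: the branch of the if/elif cascade a tag lands in
def pvQ1 (s t : String) : Bool := pvC1 s t
def pvQ2 (s t : String) : Bool := !pvC1 s t && pvC2 s t
def pvQ3 (s t : String) : Bool := !(pvC1 s t || pvC2 s t) && pvC3 s t
def pvQ4 (s t : String) : Bool := !((pvC1 s t || pvC2 s t) || pvC3 s t) && pvC4 s t
-- the (tag, score) pairs A's loop contributes for one tag
def pvG (s t : String) : List (String × Int) :=
  if pvC1 s t then [(t, 100)] else if pvC2 s t then [(t, 90)]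
  else if pvC3 s t then [(t, 70)] else if pvC4 s t then [(t, 50)] else []
-- A's composite sort key (-score, tag), as a lexicographic linear order
def pvKey (x : String × Int) : Lex (Int × String) := toLex (-x.2, x.1)

lemma pv_perm_cons1 {α : Type} (x : α) (M A B : List α) (h : M.Perm (A ++ B)) :
    (x :: M).Perm (A ++ x :: B) := (h.cons x).trans List.perm_middle.symm

lemma pv_perm_cons2 {α : Type} (x : α) (M A B C : List α) (h : M.Perm (A ++ (B ++ C))) :
    (x :: M).Perm (A ++ (B ++ x :: C)) := by
  have h' : M.Perm ((A ++ B) ++ C) := by simpa [List.append_assoc] using h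
  simpa [List.append_assoc] using pv_perm_cons1 x M (A ++ B) C h'

lemma pv_perm_cons3 {α : Type} (x : α) (M A B C D : List α) (h : M.Perm (A ++ (B ++ (C ++ D)))) :
    (x :: M).Perm (A ++ (B ++ (C ++ x :: D))) := by
  have h' : M.Perm ((A ++ (B ++ C)) ++ D) := by simpa [List.append_assoc] using h
  simpa [List.append_assoc] using pv_perm_cons1 x M (A ++ (B ++ C)) D h'

-- A's scored list is, up to permutation, the four tiers in order
lemma pv_flatMap_perm (s : String) (l : List String) :
    (l.flatMap (pvG s)).Perm
      ((l.filter (pvQ1 s)).map (fun t => (t, (100:Int))) ++ ((l.filter (pvQ2 s)).map (fun t => (t, (90:Int))) ++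
       ((l.filter (pvQ3 s)).map (fun t => (t, (70:Int))) ++ (l.filter (pvQ4 s)).map (fun t => (t, (50:Int)))))) := by
  induction l with
  | nil => simp
  | cons x l ih =>
    simp only [List.flatMap_cons, List.filter_cons, pvQ1, pvQ2, pvQ3, pvQ4]
    by_cases h1 : pvC1 s x
    · simp [pvG, h1]
      exact ih
    · by_cases h2 : pvC2 s x
      · simp [pvG, h1, h2]
        exact pv_perm_cons1 _ _ _ _ ih
      · by_cases h3 : pvC3 s x
        · simp [pvG, h1, h2, h3]
          exact pv_perm_cons2 _ _ _ _ _ ih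
        · by_cases h4 : pvC4 s x
          · simp [pvG, h1, h2, h3, h4]
            exact pv_perm_cons3 _ _ _ _ _ _ ih
          · simp [pvG, h1, h2, h3, h4]
            exact ih

-- Python's tuple key (-score, tag) is the lexicographic order pvKey
lemma pv_sorted2_lex (xs : List (String × Int)) :
    PySem.List.sorted2 xs (fun x => -x.2) (fun x => x.1) = PySem.List.sorted xs pvKey := by
  simp only [PySem.List.sorted2, PySem.List.sorted]
  have h : ∀ a b : String × Int,
      (decide ((-a.2) < (-b.2)) || (!decide ((-b.2) < (-a.2)) && decide (a.1 < b.1)))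
        = decide (pvKey a < pvKey b) := by
    intro a b
    rcases lt_trichotomy (-a.2) (-b.2) with h | h | h
    · simp [pvKey, Prod.Lex.lt_iff, h, lt_asymm h]
    · simp [pvKey, Prod.Lex.lt_iff, h]
    · simp [pvKey, Prod.Lex.lt_iff, h, lt_asymm h, ne_of_gt h]
  simp only [h]

-- a filtered slice of the alphabetically sorted duplicate-free list is strictly increasing under pvKey
lemma pv_bucket_pairwise (l : List String) (hnd : l.Nodup) (q : String → Bool) (v : Int) :
    ((((PySem.List.sorted l (fun x => x)).filter q)).map (fun t => (t, v))).Pairwise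
      (fun a b => pvKey a < pvKey b) := by
  rw [List.pairwise_map]
  have hle := PySem.List.sorted_pairwise l (fun x => x)
  have hnd' : (PySem.List.sorted l (fun x => x)).Nodup :=
    (PySem.List.sorted_perm l (fun x => x) false).nodup_iff.mpr hnd
  refine ((hle.and hnd').imp (fun {a b} h => ?_)).filter q
  rcases h with ⟨h1, h2⟩
  simp only [pvKey, Prod.Lex.lt_iff, ofLex_toLex]
  exact Or.inr ⟨by trivial, lt_of_le_of_ne h1 h2⟩

lemma pv_key_lt_of_snd {a b : String × Int} (h : -a.2 < -b.2) : pvKey a < pvKey b := by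
  simp only [pvKey, Prod.Lex.lt_iff, ofLex_toLex]
  exact Or.inl h

-- across tiers a higher tier always precedes under pvKey
lemma pv_cross (X Y : List String) (v w : Int) (h : -v < -w) :
    ∀ a ∈ X.map (fun t => (t, v)), ∀ b ∈ Y.map (fun t => (t, w)), pvKey a < pvKey b := by
  intro a ha b hb
  simp only [List.mem_map] at ha hb
  obtain ⟨ta, _, rfl⟩ := ha
  obtain ⟨tb, _, rfl⟩ := hb
  exact pv_key_lt_of_snd h

-- A's scoring loop as a flatMap
lemma pv_scored_eq (s : String) (l : List String) :
    l.foldl (fun acc tag =>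
      if PySem.Str.lower tag == s then acc ++ [(tag, (100:Int))]
      else if PySem.Str.startswith (PySem.Str.lower tag) s then acc ++ [(tag, 90)]
      else if PySem.Str.isIn s (PySem.Str.lower tag) then acc ++ [(tag, 70)]
      else if (PySem.Str.split₀ (PySem.Str.lower tag)).any (fun word => PySem.Str.startswith word s) then acc ++ [(tag, 50)]
      else acc) [] = l.flatMap (pvG s) := by
  rw [PySem.List.foldl_congr_mem l _ (fun acc tag => acc ++ pvG s tag) []]
  · exact PySem.List.foldl_append_eq_flatMap _ l []
  · intro acc x _
    simp only [pvG, pvC1, pvC2, pvC3, pvC4]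
    split_ifs <;> simp

lemma pv_slice_map {α β : Type} (f : α → β) (xs : List α) (m : Int) :
    PySem.List.slice (xs.map f) none (some m) = (PySem.List.slice xs none (some m)).map f := by
  simp [PySem.List.slice, PySem.List.clampIdx, List.map_take]

lemma pv_contains_add_ne (S : PySem.Set String) (x t : String) (h : t ≠ x) :
    PySem.Set.contains (PySem.Set.add S x) t = PySem.Set.contains S t := by
  simp only [PySem.Set.add_eq_ite]
  split_ifs with hm
  · rfl
  · simp [PySem.Set.contains_eq_listContains, h]

-- one pass of B over the duplicate-free list l: if the seen-set agrees with P on l, the pass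
-- appends exactly the tags failing P and passing test, and afterwards the seen-set agrees
-- with P ∨ test on l (and is untouched off l)
lemma pv_pass (test P : String → Bool) (l : List String) (hnd : l.Nodup) :
    ∀ (r : List String) (S : PySem.Set String), (∀ t ∈ l, PySem.Set.contains S t = P t) →
    (l.foldl (fun acc tag =>
        if !(PySem.Set.contains acc.2 tag) && test (PySem.Str.lower tag) then
          (acc.1 ++ [tag], PySem.Set.add acc.2 tag)
        else acc) (r, S)).1
      = r ++ l.filter (fun t => !P t && test (PySem.Str.lower t))
    ∧ ∀ t : String, PySem.Set.contains ((l.foldl (fun acc tag =>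
        if !(PySem.Set.contains acc.2 tag) && test (PySem.Str.lower tag) then
          (acc.1 ++ [tag], PySem.Set.add acc.2 tag)
        else acc) (r, S)).2) t =
        (if t ∈ l then P t || test (PySem.Str.lower t) else PySem.Set.contains S t) := by
  induction l with
  | nil => intro r S _; simp
  | cons x xs ih =>
    intro r S hS
    have hx : PySem.Set.contains S x = P x := hS x (List.mem_cons_self ..)
    have hxs : x ∉ xs := (List.nodup_cons.mp hnd).1
    have hnd' : xs.Nodup := (List.nodup_cons.mp hnd).2
    rw [List.foldl_cons]
    by_cases hP : P x = true
    · -- already seen (or tier condition P holds): step is a no-op on this tag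
      have hm : x ∈ S := List.mem_of_elem_eq_true (hx.trans hP)
      rw [if_neg (by simp [hm])]
      obtain ⟨ih1, ih2⟩ := ih hnd' r S (fun t ht => hS t (List.mem_cons_of_mem _ ht))
      refine ⟨by rw [ih1, List.filter_cons, if_neg (by simp [hP])], ?_⟩
      intro t
      rw [ih2 t]
      by_cases htx : t = x
      · subst htx
        simp [hxs, hm, hP]
      · simp [List.mem_cons, htx]
    · have hm : x ∉ S := fun h => hP (hx.symm.trans (List.elem_eq_true_of_mem h))
      by_cases htest : test (PySem.Str.lower x) = true
      · -- emit x and mark it seen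
        rw [if_pos (by simp [hm, htest])]
        have hS' : ∀ t ∈ xs, PySem.Set.contains (PySem.Set.add S x) t = P t := by
          intro t ht
          rw [pv_contains_add_ne S x t (fun he => hxs (he ▸ ht)),
              hS t (List.mem_cons_of_mem _ ht)]
        obtain ⟨ih1, ih2⟩ := ih hnd' (r ++ [x]) (PySem.Set.add S x) hS'
        refine ⟨by rw [ih1, List.filter_cons, if_pos (by simp [hP, htest])]; simp, ?_⟩
        intro t
        rw [ih2 t]
        by_cases htx : t = x
        · subst htx
          simp [hxs, hP, htest]
        · simp only [List.mem_cons, htx, false_or]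
          by_cases ht : t ∈ xs
          · simp [ht]
          · rw [if_neg ht, if_neg ht]
            exact pv_contains_add_ne S x t htx
      · -- no tier condition fires: no-op
        rw [if_neg (by simp [htest])]
        obtain ⟨ih1, ih2⟩ := ih hnd' r S (fun t ht => hS t (List.mem_cons_of_mem _ ht))
        refine ⟨by rw [ih1, List.filter_cons, if_neg (by simp [htest])], ?_⟩
        intro t
        rw [ih2 t]
        by_cases htx : t = x
        · subst htx
          simp [hxs, hm, hP, htest]
        · simp [List.mem_cons, htx]

theorem pv_main (all_tags : List String) (search_term : String) (max_results : Int)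
    (hnd : all_tags.Nodup) :
    search_tags all_tags search_term max_results = search_tags_alt all_tags search_term max_results := by
  simp only [search_tags, search_tags_alt]
  by_cases he : search_term == ""
  · simp [he]
  · simp only [he, Bool.false_eq_true, if_false, List.foldl_cons, List.foldl_nil]
    set s := PySem.Str.lower search_term with hs
    set l := all_tags with hl
    set ordered := PySem.List.sorted l (fun t => t) with hord
    have hndo : ordered.Nodup := (PySem.List.sorted_perm l (fun t => t) false).nodup_iff.mpr hnd
    -- ===== B side: the four passes compute the four tier filters of `ordered` =====
    obtain ⟨p1a, p1b⟩ := pv_pass (fun t => t == s) (fun _ => false) ordered hndo []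
      PySem.Set.empty (fun t _ => rfl)
    obtain ⟨p2a, p2b⟩ := pv_pass (fun t => PySem.Str.startswith t s) (fun t => pvC1 s t) ordered hndo _ _
      (fun t ht => by rw [p1b t, if_pos ht]; simp [pvC1])
    obtain ⟨p3a, p3b⟩ := pv_pass (fun t => PySem.Str.isIn s t) (fun t => pvC1 s t || pvC2 s t) ordered hndo _ _
      (fun t ht => by rw [p2b t, if_pos ht]; simp [pvC2])
    obtain ⟨p4a, _⟩ := pv_pass (fun t => (PySem.Str.split₀ t).any (fun w => PySem.Str.startswith w s))
      (fun t => (pvC1 s t || pvC2 s t) || pvC3 s t) ordered hndo _ _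
      (fun t ht => by rw [p3b t, if_pos ht]; simp [pvC3])
    rw [p4a, p3a, p2a, p1a]
    have hf1 : ordered.filter (fun t => !(fun (_ : String) => false) t && ((fun t => t == s) (PySem.Str.lower t)))
        = ordered.filter (pvQ1 s) := List.filter_congr (fun t _ => by simp [pvQ1, pvC1])
    have hf2 : ordered.filter (fun t => !pvC1 s t && ((fun t => PySem.Str.startswith t s) (PySem.Str.lower t)))
        = ordered.filter (pvQ2 s) := List.filter_congr (fun t _ => by simp [pvQ2, pvC2])
    have hf3 : ordered.filter (fun t => !(pvC1 s t || pvC2 s t) && ((fun t => PySem.Str.isIn s t) (PySem.Str.lower t)))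
        = ordered.filter (pvQ3 s) := List.filter_congr (fun t _ => by simp [pvQ3, pvC3])
    have hf4 : ordered.filter (fun t => !((pvC1 s t || pvC2 s t) || pvC3 s t) && ((fun t => (PySem.Str.split₀ t).any (fun w => PySem.Str.startswith w s)) (PySem.Str.lower t)))
        = ordered.filter (pvQ4 s) := List.filter_congr (fun t _ => by simp [pvQ4, pvC4])
    rw [hf1, hf2, hf3, hf4]
    -- ===== A side: the composite sort equals the same four filters concatenated =====
    rw [pv_scored_eq s l]
    set E := ordered.filter (pvQ1 s) with hE
    set P := ordered.filter (pvQ2 s) with hP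
    set C := ordered.filter (pvQ3 s) with hC
    set W := ordered.filter (pvQ4 s) with hW
    have hperm : (E.map (fun t => (t, (100:Int))) ++ (P.map (fun t => (t, (90:Int))) ++
        (C.map (fun t => (t, (70:Int))) ++ W.map (fun t => (t, (50:Int)))))).Perm
        (l.flatMap (pvG s)) := by
      refine List.Perm.trans ?_ (pv_flatMap_perm s l).symm
      have hq : ∀ q : String → Bool, (ordered.filter q).Perm (l.filter q) :=
        fun q => (PySem.List.sorted_perm l (fun t => t) false).filter q
      exact (((hq _).map _).append (((hq _).map _).append (((hq _).map _).append ((hq _).map _))))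
    have hpw : (E.map (fun t => (t, (100:Int))) ++ (P.map (fun t => (t, (90:Int))) ++
        (C.map (fun t => (t, (70:Int))) ++ W.map (fun t => (t, (50:Int)))))).Pairwise
        (fun a b => pvKey a < pvKey b) := by
      rw [List.pairwise_append, List.pairwise_append, List.pairwise_append]
      refine ⟨pv_bucket_pairwise l hnd _ 100,
        ⟨pv_bucket_pairwise l hnd _ 90,
          ⟨pv_bucket_pairwise l hnd _ 70, pv_bucket_pairwise l hnd _ 50,
            pv_cross C W 70 50 (by norm_num)⟩, ?_⟩, ?_⟩
      · intro a ha b hb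
        rcases List.mem_append.1 hb with hb | hb
        exacts [pv_cross P C 90 70 (by norm_num) a ha b hb,
                pv_cross P W 90 50 (by norm_num) a ha b hb]
      · intro a ha b hb
        rcases List.mem_append.1 hb with hb | hb
        · exact pv_cross E P 100 90 (by norm_num) a ha b hb
        · rcases List.mem_append.1 hb with hb | hb
          exacts [pv_cross E C 100 70 (by norm_num) a ha b hb,
                  pv_cross E W 100 50 (by norm_num) a ha b hb]
    rw [pv_sorted2_lex, PySem.List.sorted_eq_of_perm_of_pairwise_lt _ _ _ hperm hpw,
        ← pv_slice_map]
    congr 1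
    simp [List.map_map, Function.comp_def, List.append_assoc]

-- ===== VERDICT (by name: the statement is the Claim_ definition above) =====
theorem search_tags_spec : Claim_equal_search_tags := by
  intro all_tags search_term max_results _ hpre
  exact pv_main all_tags search_term max_results hpre
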